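-- pv_equiv track=rewrite | github.com/dev-3-drjoy/map_traffics | traffic.py | _encode_polyline_signed
-- ===== SOURCE A (Python) =====
-- def _encode_polyline_signed(n: int) -> str:
--     n = n << 1 if n >= 0 else ~n
--     chunks: list[str] = []
--     while n >= 0x20:
--         chunks.append(chr((0x20 | (n & 0x1F)) + 63))
--         n >>= 5
--     chunks.append(chr(n + 63))
--     return "".join(chunks)
-- ===== SOURCE B (Python) =====
-- def _encode_polyline_signed(n: int) -> str:
--     # Loop-free: compute the digit count from the bit length, then extract each
--     # 5-bit group by independent indexed shifts (no destructive shifting loop).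
--     m = n << 1 if n >= 0 else ~n
--     k = max(1, (m.bit_length() + 4) // 5)
--     return "".join(
--         chr(((m >> (5 * i)) & 0x1F) + (95 if i < k - 1 else 63)) for i in range(k)
--     )
-- ===== Notes on version B (the rewrite author's own statement) =====
-- stated objective: alternative
-- what changed: Replaces A's destructive while-loop (shift, test >=0x20, emit) by a loop-free formulation: the number of 5-bit groups is computed up front from the bit length, and each output character is extracted by an independent indexed shift (m >> 5*i) & 0x1F with the continuation offset decided by position.
import Mathlib
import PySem

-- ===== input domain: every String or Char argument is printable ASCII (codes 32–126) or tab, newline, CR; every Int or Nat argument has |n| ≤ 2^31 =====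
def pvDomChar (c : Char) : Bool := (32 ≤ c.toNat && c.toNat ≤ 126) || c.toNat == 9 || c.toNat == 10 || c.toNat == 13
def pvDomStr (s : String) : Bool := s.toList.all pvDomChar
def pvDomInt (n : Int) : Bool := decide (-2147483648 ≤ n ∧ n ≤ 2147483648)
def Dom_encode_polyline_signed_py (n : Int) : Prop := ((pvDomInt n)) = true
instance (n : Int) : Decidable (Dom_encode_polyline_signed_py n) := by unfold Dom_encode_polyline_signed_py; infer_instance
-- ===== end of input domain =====

-- B replaces A's destructive shift-and-test while loop by a loop-free formulation:
-- digit count from the bit length, each character by an independent indexed shift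
-- (objective: alternative; same asymptotic cost).

-- Python's transform `n << 1 if n >= 0 else ~n` (exact: n<<1 = 2*n, ~n = -n-1); the result
-- is always ≥ 0, so `.toNat` is exact and both ports work over Nat as Python does on ints ≥ 0.
def pvTransform (n : Int) : Nat := (if 0 ≤ n then 2 * n else -n - 1).toNat

-- ===== PORT A =====
-- A's while loop: while n >= 0x20 emit chr((0x20 | (n & 0x1F)) + 63), n >>= 5; then chr(n + 63).
def pvChunksA (n : Nat) : List Char :=
  if h : 32 ≤ n then
    Char.ofNat ((32 ||| (n &&& 31)) + 63) :: pvChunksA (n >>> 5)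
  else
    [Char.ofNat (n + 63)]
decreasing_by
  simp only [Nat.shiftRight_eq_div_pow]
  exact Nat.div_lt_self (by omega) (by norm_num)

def encode_polyline_signed_py (n : Int) : String :=
  String.ofList (pvChunksA (pvTransform n))

-- ===== PORT B =====
-- Source B: k = max(1, (m.bit_length() + 4) // 5)  (Nat.size is Python's int.bit_length on Nat).
def pvK (m : Nat) : Nat := max 1 ((Nat.size m + 4) / 5)

-- Source B's generator: for i in range(k), chr(((m >> 5*i) & 0x1F) + (95 if i < k-1 else 63)).
def encode_polyline_signed_py_alt (n : Int) : String :=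
  let m := pvTransform n
  let k := pvK m
  String.ofList ((List.range k).map (fun i =>
    Char.ofNat (((m >>> (5 * i)) &&& 31) + (if i < k - 1 then 95 else 63))))

-- ===== PRECONDITION & SPEC =====
def Spec_encode_polyline_signed_py (n : Int) (out : String) : Prop := out = encode_polyline_signed_py_alt n
instance (n : Int) (out : String) : Decidable (Spec_encode_polyline_signed_py n out) := by unfold Spec_encode_polyline_signed_py; infer_instance

-- ===== CLAIM (what is proved, stated in full; the proofs are below) =====
def Claim_equal_encode_polyline_signed_py : Prop := ∀ (n : Int), Dom_encode_polyline_signed_py n → Spec_encode_polyline_signed_py n (encode_polyline_signed_py n)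

-- ===== LEMMAS AND PROOFS =====

theorem pv_and31 (n : Nat) : n &&& 31 = n % 32 := Nat.and_two_pow_sub_one_eq_mod n 5

theorem pv_shr5 (n : Nat) : n >>> 5 = n / 32 := by
  simp [Nat.shiftRight_eq_div_pow]

theorem pv_or32_fin : ∀ x : Fin 32, 32 ||| (x : Nat) = 32 + x := by decide

theorem pv_or32 (x : Nat) (h : x < 32) : 32 ||| x = 32 + x := pv_or32_fin ⟨x, h⟩

-- bit length of m >>> 5 when m ≥ 32
theorem pv_size_shr (m : Nat) (h : 32 ≤ m) : Nat.size (m >>> 5) = Nat.size m - 5 := by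
  rw [pv_shr5]
  have h6 : 6 ≤ Nat.size m := by
    have : 5 < Nat.size m := Nat.lt_size.mpr (by norm_num; omega)
    omega
  have hub : m < 2 ^ Nat.size m := Nat.lt_size_self m
  have hlb : 2 ^ (Nat.size m - 1) ≤ m := Nat.lt_size.mp (by omega)
  have hpow : 2 ^ (Nat.size m - 5) * 32 = 2 ^ Nat.size m := by
    rw [show (32 : Nat) = 2 ^ 5 from rfl, ← pow_add]
    congr 1; omega
  have hpow2 : 2 ^ (Nat.size m - 6) * 32 = 2 ^ (Nat.size m - 1) := by
    rw [show (32 : Nat) = 2 ^ 5 from rfl, ← pow_add]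
    congr 1; omega
  apply Nat.le_antisymm
  · exact Nat.size_le.mpr (Nat.div_lt_of_lt_mul (by omega))
  · have hlt : Nat.size m - 6 < Nat.size (m / 32) := by
      apply Nat.lt_size.mpr
      rw [Nat.le_div_iff_mul_le (by norm_num)]
      omega
    omega

theorem pv_k_one (m : Nat) (h : m < 32) : pvK m = 1 := by
  have : Nat.size m ≤ 5 := Nat.size_le.mpr (by norm_num; omega)
  unfold pvK; omega

theorem pv_k_succ (m : Nat) (h : 32 ≤ m) : pvK m = pvK (m >>> 5) + 1 := by
  have h6 : 6 ≤ Nat.size m := by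
    have : 5 < Nat.size m := Nat.lt_size.mpr (by norm_num; omega)
    omega
  unfold pvK
  rw [pv_size_shr m h]
  omega

theorem pv_main (m : Nat) :
    pvChunksA m = (List.range (pvK m)).map (fun i =>
      Char.ofNat (((m >>> (5 * i)) &&& 31) + (if i < pvK m - 1 then 95 else 63))) := by
  induction m using pvChunksA.induct with
  | case1 n h ih =>
    rw [pvChunksA, dif_pos h, ih, pv_k_succ n h]
    have hk' : 1 ≤ pvK (n >>> 5) := le_max_left 1 _
    rw [List.range_succ_eq_map, List.map_cons, List.map_map]
    congr 1
    · rw [pv_or32 (n &&& 31) (by rw [pv_and31]; omega)]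
      simp only [Nat.mul_zero, Nat.shiftRight_zero]
      rw [if_pos (by omega : 0 < pvK (n >>> 5) + 1 - 1)]
      congr 1
      omega
    · refine List.map_congr_left (fun i _ => ?_)
      simp only [Function.comp_apply]
      rw [show 5 * (i + 1) = 5 + 5 * i by ring, Nat.shiftRight_add]
      congr 1
      by_cases hc : i < pvK (n >>> 5) - 1
      · rw [if_pos hc, if_pos (by omega)]
      · rw [if_neg hc, if_neg (by omega)]
  | case2 n h =>
    rw [pvChunksA, dif_neg h, pv_k_one n (by omega)]
    simp only [List.range_one, List.map_cons, List.map_nil]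
    rw [if_neg (by omega : ¬ (0 < 1 - 1))]
    simp only [Nat.mul_zero, Nat.shiftRight_zero]
    rw [show n &&& 31 = n by rw [pv_and31]; omega]

-- ===== VERDICT (by name: the statement is the Claim_ definition above) =====
theorem encode_polyline_signed_py_spec : Claim_equal_encode_polyline_signed_py := by
  intro n _
  unfold Spec_encode_polyline_signed_py encode_polyline_signed_py encode_polyline_signed_py_alt
  rw [pv_main]
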